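-- pv_equiv track=rewrite | github.com/GalTechDev/LiDAR-room-scanner | lib/data_treatment.py | data2mesh
-- ===== SOURCE A (Python) =====
-- def data2mesh(data_x, data_y, data_z, min_h, max_h, min_v, max_v, res):
--     mesh_x = [] #[[], [], ] list of list of vertical data
--     mesh_y = []
--     mesh_z = []
--
--     coef = (max_v-min_v+res)//res
--
--     for hi in range(0, (max_h-min_h)//res):
--         mesh_x.append(data_x[hi*coef:(hi+1)*coef])
--         mesh_y.append(data_y[hi*coef:(hi+1)*coef])
--         mesh_z.append(data_z[hi*coef:(hi+1)*coef])
--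
--     triangles = [] #[((x1, y1, z1), (x2, y2, z2), (x3, y3, z3)), ...] liste of tuple with 3 points that make shape
--     for hi in range(0, (max_h-min_h)//res-1):
--         for vi in range(0, (max_v-min_v)//res-1):
--             triangles.append(
--                 (
--                     (mesh_x[hi][vi], mesh_y[hi][vi], mesh_z[hi][vi]),
--                     (mesh_x[hi+1][vi], mesh_y[hi+1][vi], mesh_z[hi+1][vi]),
--                     (mesh_x[hi][vi+1], mesh_y[hi][vi+1], mesh_z[hi][vi+1])
--                 ))
--
--             """if hi == 0:
--                 triangles.append(
--                 (
--                     (mesh_x[hi][vi], mesh_y[hi][vi], mesh_z[hi][vi]),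
--                     (mesh_x[hi-1][vi], mesh_y[hi-1][vi], mesh_z[hi-1][vi]),
--                     (mesh_x[hi-1][vi+1], mesh_y[hi-1][vi+1], mesh_z[hi-1][vi+1])
--                 ))"""
--
--     for hi in range(0, (max_h-min_h)//res):
--         for vi in range(1, (max_v-min_v)//res):
--             triangles.append(
--                 (
--                     (mesh_x[hi][vi], mesh_y[hi][vi], mesh_z[hi][vi]),
--                     (mesh_x[hi-1][vi], mesh_y[hi-1][vi], mesh_z[hi-1][vi]),
--                     (mesh_x[hi][vi-1], mesh_y[hi][vi-1], mesh_z[hi][vi-1])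
--                 ))
--
--     mesh_x.clear()
--     mesh_y.clear()
--     mesh_z.clear()
--
--     for triangle in triangles:
--         mesh_x += [triangle[0][0], triangle[1][0], triangle[2][0]]
--         mesh_y += [triangle[0][1], triangle[1][1], triangle[2][1]]
--         mesh_z += [triangle[0][2], triangle[1][2], triangle[2][2]]
--
--     return mesh_x, mesh_y, mesh_z
-- ===== SOURCE B (Python) =====
-- def data2mesh(data_x, data_y, data_z, min_h, max_h, min_v, max_v, res):
--     coef = (max_v - min_v + res) // res
--     rows = (max_h - min_h) // res
--     cols = (max_v - min_v) // res
--
--     mesh_x = []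
--     mesh_y = []
--     mesh_z = []
--
--     def emit(points):
--         # one triangle: three (row, col) grid positions, read straight
--         # from the flat arrays (row % rows reproduces the -1 wrap)
--         for r, c in points:
--             i = (r % rows) * coef + c
--             mesh_x.append(data_x[i])
--             mesh_y.append(data_y[i])
--             mesh_z.append(data_z[i])
--
--     for hi in range(rows - 1):
--         for vi in range(cols - 1):
--             emit([(hi, vi), (hi + 1, vi), (hi, vi + 1)])
--
--     for hi in range(rows):
--         for vi in range(1, cols):
--             emit([(hi, vi), (hi - 1, vi), (hi, vi - 1)])
--
--     return mesh_x, mesh_y, mesh_z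
-- ===== Notes on version B (the rewrite author's own statement) =====
-- stated objective: simpler
-- what changed: B drops the intermediate 2D mesh grid (row slices) and the triangle tuple list entirely: it indexes the flat input arrays directly as data[(row % rows)*coef + col] and appends each vertex straight into the three output lists in one pass, the modulo reproducing Python's negative-index wrap at hi==0.
import Mathlib
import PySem

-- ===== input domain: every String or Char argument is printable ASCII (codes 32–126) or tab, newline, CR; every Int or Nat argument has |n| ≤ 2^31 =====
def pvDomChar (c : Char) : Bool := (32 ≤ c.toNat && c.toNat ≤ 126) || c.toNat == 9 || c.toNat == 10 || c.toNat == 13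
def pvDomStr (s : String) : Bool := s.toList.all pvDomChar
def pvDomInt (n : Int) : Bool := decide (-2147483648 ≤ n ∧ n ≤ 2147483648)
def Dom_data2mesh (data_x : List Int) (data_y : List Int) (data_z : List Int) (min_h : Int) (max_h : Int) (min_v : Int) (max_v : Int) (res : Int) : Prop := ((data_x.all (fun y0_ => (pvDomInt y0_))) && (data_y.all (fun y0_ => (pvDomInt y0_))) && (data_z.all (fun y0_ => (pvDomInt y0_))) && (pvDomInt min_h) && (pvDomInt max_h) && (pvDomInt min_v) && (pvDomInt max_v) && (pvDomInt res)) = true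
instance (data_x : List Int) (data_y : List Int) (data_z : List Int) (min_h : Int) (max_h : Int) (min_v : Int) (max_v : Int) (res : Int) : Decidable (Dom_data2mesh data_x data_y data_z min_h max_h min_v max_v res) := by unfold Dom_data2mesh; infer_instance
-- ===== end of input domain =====

-- B drops A's intermediate 2D mesh grid (row slices) and the triangle tuple list: it indexes the
-- flat input arrays directly as data[(row % rows)*coef + col] and appends each vertex straight into
-- the three output lists (objective: simpler; same asymptotic cost).

-- ===== PORT A =====
-- for hi in range(0, n): mesh.append(data[hi*coef:(hi+1)*coef])
def dmRowsA (d : List Int) (n coef : Int) : List (List Int) :=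
  (PySem.List.pyRange 0 n 1).foldl
    (fun m hi => m ++ [PySem.List.slice d (some (hi * coef)) (some ((hi + 1) * coef))]) []

-- mesh[r][c]; pyGetD is exact wherever Python's indexing does not raise (Pre_ excludes the raising inputs)
def dmAt (mesh : List (List Int)) (r c : Int) : Int :=
  PySem.List.pyGetD (PySem.List.pyGetD mesh r []) c 0

def data2mesh (data_x : List Int) (data_y : List Int) (data_z : List Int) (min_h : Int) (max_h : Int) (min_v : Int) (max_v : Int) (res : Int) : List Int × List Int × List Int :=
  let coef := PySem.Int.floordiv (max_v - min_v + res) res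
  let mesh_x := dmRowsA data_x (PySem.Int.floordiv (max_h - min_h) res) coef
  let mesh_y := dmRowsA data_y (PySem.Int.floordiv (max_h - min_h) res) coef
  let mesh_z := dmRowsA data_z (PySem.Int.floordiv (max_h - min_h) res) coef
  let t1 := (PySem.List.pyRange 0 (PySem.Int.floordiv (max_h - min_h) res - 1) 1).foldl (fun ts hi =>
    (PySem.List.pyRange 0 (PySem.Int.floordiv (max_v - min_v) res - 1) 1).foldl (fun ts vi =>
      ts ++ [((dmAt mesh_x hi vi, dmAt mesh_y hi vi, dmAt mesh_z hi vi),
              (dmAt mesh_x (hi + 1) vi, dmAt mesh_y (hi + 1) vi, dmAt mesh_z (hi + 1) vi),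
              (dmAt mesh_x hi (vi + 1), dmAt mesh_y hi (vi + 1), dmAt mesh_z hi (vi + 1)))]) ts) []
  let triangles := (PySem.List.pyRange 0 (PySem.Int.floordiv (max_h - min_h) res) 1).foldl (fun ts hi =>
    (PySem.List.pyRange 1 (PySem.Int.floordiv (max_v - min_v) res) 1).foldl (fun ts vi =>
      ts ++ [((dmAt mesh_x hi vi, dmAt mesh_y hi vi, dmAt mesh_z hi vi),
              (dmAt mesh_x (hi - 1) vi, dmAt mesh_y (hi - 1) vi, dmAt mesh_z (hi - 1) vi),
              (dmAt mesh_x hi (vi - 1), dmAt mesh_y hi (vi - 1), dmAt mesh_z hi (vi - 1)))]) ts) t1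
  triangles.foldl (fun acc t =>
    (acc.1 ++ [t.1.1, t.2.1.1, t.2.2.1],
     acc.2.1 ++ [t.1.2.1, t.2.1.2.1, t.2.2.2.1],
     acc.2.2 ++ [t.1.2.2, t.2.1.2.2, t.2.2.2.2])) ([], [], [])

-- ===== PORT B =====
-- emit(points): append one vertex per (row, col) grid position, read from the flat arrays
def dmEmit (dx dy dz : List Int) (rows coef : Int)
    (st : List Int × List Int × List Int) (pts : List (Int × Int)) :
    List Int × List Int × List Int :=
  pts.foldl (fun st p =>
    (st.1 ++ [PySem.List.pyGetD dx (PySem.Int.mod p.1 rows * coef + p.2) 0],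
     st.2.1 ++ [PySem.List.pyGetD dy (PySem.Int.mod p.1 rows * coef + p.2) 0],
     st.2.2 ++ [PySem.List.pyGetD dz (PySem.Int.mod p.1 rows * coef + p.2) 0])) st

def data2mesh_alt (data_x : List Int) (data_y : List Int) (data_z : List Int) (min_h : Int) (max_h : Int) (min_v : Int) (max_v : Int) (res : Int) : List Int × List Int × List Int :=
  let coef := PySem.Int.floordiv (max_v - min_v + res) res
  let rows := PySem.Int.floordiv (max_h - min_h) res
  let cols := PySem.Int.floordiv (max_v - min_v) res
  let st := (PySem.List.pyRange 0 (rows - 1) 1).foldl (fun st hi =>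
    (PySem.List.pyRange 0 (cols - 1) 1).foldl (fun st vi =>
      dmEmit data_x data_y data_z rows coef st [(hi, vi), (hi + 1, vi), (hi, vi + 1)]) st) ([], [], [])
  (PySem.List.pyRange 0 rows 1).foldl (fun st hi =>
    (PySem.List.pyRange 1 cols 1).foldl (fun st vi =>
      dmEmit data_x data_y data_z rows coef st [(hi, vi), (hi - 1, vi), (hi, vi - 1)]) st) st

-- ===== PRECONDITION & SPEC =====
-- Pre_ excludes exactly the inputs on which A raises: res = 0 (ZeroDivisionError), and inputs where
-- some accessed grid cell is missing because a data list is shorter than rows*coef - 1 (IndexError).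
def Pre_data2mesh (data_x : List Int) (data_y : List Int) (data_z : List Int) (min_h : Int) (max_h : Int) (min_v : Int) (max_v : Int) (res : Int) : Prop :=
  res ≠ 0 ∧
  (PySem.Int.floordiv (max_h - min_h) res ≤ 0 ∨
   PySem.Int.floordiv (max_v - min_v) res ≤ 1 ∨
   (PySem.Int.floordiv (max_h - min_h) res * PySem.Int.floordiv (max_v - min_v + res) res - 1 ≤ (data_x.length : Int) ∧
    PySem.Int.floordiv (max_h - min_h) res * PySem.Int.floordiv (max_v - min_v + res) res - 1 ≤ (data_y.length : Int) ∧
    PySem.Int.floordiv (max_h - min_h) res * PySem.Int.floordiv (max_v - min_v + res) res - 1 ≤ (data_z.length : Int)))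
instance (data_x : List Int) (data_y : List Int) (data_z : List Int) (min_h : Int) (max_h : Int) (min_v : Int) (max_v : Int) (res : Int) : Decidable (Pre_data2mesh data_x data_y data_z min_h max_h min_v max_v res) := by unfold Pre_data2mesh; infer_instance

def pvWitness_data2mesh : List Int × List Int × List Int × Int × Int × Int × Int × Int :=
  ([1, 2, 3, 4, 5, 6], [7, 8, 9, 10, 11, 12], [13, 14, 15, 16, 17, 18], 0, 2, 0, 2, 1)

def Spec_data2mesh (data_x : List Int) (data_y : List Int) (data_z : List Int) (min_h : Int) (max_h : Int) (min_v : Int) (max_v : Int) (res : Int) (out : List Int × List Int × List Int) : Prop := out = data2mesh_alt data_x data_y data_z min_h max_h min_v max_v res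
instance (data_x : List Int) (data_y : List Int) (data_z : List Int) (min_h : Int) (max_h : Int) (min_v : Int) (max_v : Int) (res : Int) (out : List Int × List Int × List Int) : Decidable (Spec_data2mesh data_x data_y data_z min_h max_h min_v max_v res out) := by unfold Spec_data2mesh; infer_instance

-- ===== CLAIM (what is proved, stated in full; the proofs are below) =====
def Claim_equal_data2mesh : Prop := ∀ (data_x : List Int) (data_y : List Int) (data_z : List Int) (min_h : Int) (max_h : Int) (min_v : Int) (max_v : Int) (res : Int), Dom_data2mesh data_x data_y data_z min_h max_h min_v max_v res → Pre_data2mesh data_x data_y data_z min_h max_h min_v max_v res → Spec_data2mesh data_x data_y data_z min_h max_h min_v max_v res (data2mesh data_x data_y data_z min_h max_h min_v max_v res)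

-- ===== LEMMAS AND PROOFS =====

theorem pvWitness_ok :
    Dom_data2mesh (pvWitness_data2mesh.1) (pvWitness_data2mesh.2.1) (pvWitness_data2mesh.2.2.1) (pvWitness_data2mesh.2.2.2.1) (pvWitness_data2mesh.2.2.2.2.1) (pvWitness_data2mesh.2.2.2.2.2.1) (pvWitness_data2mesh.2.2.2.2.2.2.1) (pvWitness_data2mesh.2.2.2.2.2.2.2) ∧
    Pre_data2mesh (pvWitness_data2mesh.1) (pvWitness_data2mesh.2.1) (pvWitness_data2mesh.2.2.1) (pvWitness_data2mesh.2.2.2.1) (pvWitness_data2mesh.2.2.2.2.1) (pvWitness_data2mesh.2.2.2.2.2.1) (pvWitness_data2mesh.2.2.2.2.2.2.1) (pvWitness_data2mesh.2.2.2.2.2.2.2) := by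
  decide

-- a loop appending one block to each of the three accumulated lists per element
theorem foldl_emit3 {α : Type} (e1 e2 e3 : α → List Int) (ts : List α)
    (st : List Int × List Int × List Int) :
    ts.foldl (fun acc t => (acc.1 ++ e1 t, acc.2.1 ++ e2 t, acc.2.2 ++ e3 t)) st
      = (st.1 ++ ts.flatMap e1, st.2.1 ++ ts.flatMap e2, st.2.2 ++ ts.flatMap e3) := by
  induction ts generalizing st with
  | nil => simp
  | cons t ts ih => simp [ih, List.append_assoc]

theorem mod_char (r n : Int) (hn : 0 < n) (hr1 : -1 ≤ r) (hr2 : r ≤ n - 1) :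
    PySem.Int.mod r n = if r = -1 then n - 1 else r := by
  rw [PySem.Int.mod_eq_emod_of_pos hn]
  by_cases h : r = -1
  · subst h
    rw [if_pos rfl]
    have h1 : (-1 : Int) % n = (n - 1) % n := by
      conv_lhs => rw [show (-1 : Int) = (n - 1) + (-1) * n by ring]
      exact Int.add_mul_emod_self_right (n - 1) (-1) n
    rw [h1, Int.emod_eq_of_lt (by omega) (by omega)]
  · rw [if_neg h]
    exact Int.emod_eq_of_lt (by omega) (by omega)

theorem dmRowsA_eq (d : List Int) (n coef : Int) :
    dmRowsA d n coef = (PySem.List.pyRange 0 n 1).map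
      (fun hi => PySem.List.slice d (some (hi * coef)) (some ((hi + 1) * coef))) := by
  unfold dmRowsA
  rw [PySem.List.foldl_append_singleton_eq_map]
  simp

theorem row_get (d : List Int) (n coef r : Int) (h0 : 0 ≤ r) (h1 : r < n) :
    PySem.List.pyGetD (dmRowsA d n coef) r []
      = PySem.List.slice d (some (r * coef)) (some ((r + 1) * coef)) := by
  rw [dmRowsA_eq]
  exact PySem.List.pyGetD_map_pyRange_of_nonneg _ n r [] h0 h1

theorem row_get_neg (d : List Int) (n coef : Int) (hn : 1 ≤ n) :
    PySem.List.pyGetD (dmRowsA d n coef) (-1) []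
      = PySem.List.slice d (some ((n - 1) * coef)) (some ((n - 1 + 1) * coef)) := by
  rw [dmRowsA_eq]
  have hl : ((PySem.List.pyRange 0 n 1).map
      (fun hi => PySem.List.slice d (some (hi * coef)) (some ((hi + 1) * coef)))).length = n.toNat := by
    simp [PySem.List.length_pyRange_one]
  rw [PySem.List.pyGetD_neg_ofNat _ 1 [] (by omega) (by rw [hl]; omega)]
  rw [List.getElem_map, PySem.List.getElem_pyRange_one]
  simp only [hl]
  have h1 : (0 : Int) + ((n.toNat - 1 : Nat) : Int) = n - 1 := by omega
  rw [h1]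

theorem slice_get (d : List Int) (a coef c : Int) (ha : 0 ≤ a) (hc1 : 0 ≤ c) (hc2 : c < coef)
    (hlen : a + c < (d.length : Int)) :
    PySem.List.pyGetD (PySem.List.slice d (some a) (some (a + coef))) c 0
      = PySem.List.pyGetD d (a + c) 0 := by
  rw [PySem.List.slice_toNat d ha (by omega)]
  rw [PySem.List.pyGetD_eq_getElem _ 0 hc1 (by simp; omega),
      PySem.List.pyGetD_eq_getElem _ 0 (by omega) (by omega)]
  rw [List.getElem_take, List.getElem_drop]
  congr 1
  omega

-- a single grid access: A's sliced-row lookup equals B's flat-array lookup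
theorem point_eq (d : List Int) (n m coef r c : Int)
    (hcoef : coef = m + 1) (hn : 1 ≤ n) (hm : 2 ≤ m)
    (hr1 : -1 ≤ r) (hr2 : r ≤ n - 1) (hc1 : 0 ≤ c) (hc2 : c ≤ m - 1)
    (hlen : n * coef - 1 ≤ (d.length : Int)) :
    dmAt (dmRowsA d n coef) r c
      = PySem.List.pyGetD d (PySem.Int.mod r n * coef + c) 0 := by
  have hmod := mod_char r n (by omega) hr1 hr2
  have key : ∀ r' : Int, 0 ≤ r' → r' ≤ n - 1 →
      PySem.List.pyGetD (PySem.List.slice d (some (r' * coef)) (some ((r' + 1) * coef))) c 0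
        = PySem.List.pyGetD d (r' * coef + c) 0 := by
    intro r' h0 h1
    have hcc : r' * coef + coef ≤ n * coef := by
      calc r' * coef + coef = (r' + 1) * coef := by ring
        _ ≤ n * coef := by
            exact mul_le_mul_of_nonneg_right (by omega) (by omega)
    have hstep : (r' + 1) * coef = r' * coef + coef := by ring
    rw [hstep]
    exact slice_get d (r' * coef) coef c (mul_nonneg h0 (by omega)) hc1 (by omega) (by linarith)
  unfold dmAt
  by_cases hneg : r = -1
  · subst hneg
    rw [hmod, if_pos rfl, row_get_neg d n coef hn, key (n - 1) (by omega) (by omega)]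
  · rw [hmod, if_neg hneg, row_get d n coef r (by omega) (by omega),
      key r (by omega) (by omega)]

-- one data component: A's two triangle passes (read through the sliced mesh) equal B's flat reads
theorem comp_eq (d : List Int) (n m coef : Int) (hcoef : coef = m + 1)
    (hcase : n ≤ 0 ∨ m ≤ 1 ∨ n * coef - 1 ≤ (d.length : Int)) :
    ((PySem.List.pyRange 0 (n - 1) 1).flatMap (fun hi =>
        (PySem.List.pyRange 0 (m - 1) 1).flatMap (fun vi =>
          [dmAt (dmRowsA d n coef) hi vi, dmAt (dmRowsA d n coef) (hi + 1) vi,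
           dmAt (dmRowsA d n coef) hi (vi + 1)]))) ++
      ((PySem.List.pyRange 0 n 1).flatMap (fun hi =>
        (PySem.List.pyRange 1 m 1).flatMap (fun vi =>
          [dmAt (dmRowsA d n coef) hi vi, dmAt (dmRowsA d n coef) (hi - 1) vi,
           dmAt (dmRowsA d n coef) hi (vi - 1)])))
    = ((PySem.List.pyRange 0 (n - 1) 1).flatMap (fun hi =>
        (PySem.List.pyRange 0 (m - 1) 1).flatMap (fun vi =>
          [PySem.List.pyGetD d (PySem.Int.mod hi n * coef + vi) 0,
           PySem.List.pyGetD d (PySem.Int.mod (hi + 1) n * coef + vi) 0,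
           PySem.List.pyGetD d (PySem.Int.mod hi n * coef + (vi + 1)) 0]))) ++
      ((PySem.List.pyRange 0 n 1).flatMap (fun hi =>
        (PySem.List.pyRange 1 m 1).flatMap (fun vi =>
          [PySem.List.pyGetD d (PySem.Int.mod hi n * coef + vi) 0,
           PySem.List.pyGetD d (PySem.Int.mod (hi - 1) n * coef + vi) 0,
           PySem.List.pyGetD d (PySem.Int.mod hi n * coef + (vi - 1)) 0]))) := by
  refine congrArg₂ (· ++ ·) ?_ ?_ <;>
    (refine List.flatMap_congr ?_; intro hi hhi; refine List.flatMap_congr ?_; intro vi hvi;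
     rw [PySem.List.mem_pyRange_one] at hhi hvi)
  · have hlen : n * coef - 1 ≤ (d.length : Int) := by
      rcases hcase with h | h | h <;> omega
    rw [point_eq d n m coef hi vi hcoef (by omega) (by omega) (by omega) (by omega) (by omega) (by omega) hlen,
        point_eq d n m coef (hi + 1) vi hcoef (by omega) (by omega) (by omega) (by omega) (by omega) (by omega) hlen,
        point_eq d n m coef hi (vi + 1) hcoef (by omega) (by omega) (by omega) (by omega) (by omega) (by omega) hlen]
  · have hlen : n * coef - 1 ≤ (d.length : Int) := by
      rcases hcase with h | h | h <;> omega
    rw [point_eq d n m coef hi vi hcoef (by omega) (by omega) (by omega) (by omega) (by omega) (by omega) hlen,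
        point_eq d n m coef (hi - 1) vi hcoef (by omega) (by omega) (by omega) (by omega) (by omega) (by omega) hlen,
        point_eq d n m coef hi (vi - 1) hcoef (by omega) (by omega) (by omega) (by omega) (by omega) (by omega) hlen]

-- ===== VERDICT (by name: the statement is the Claim_ definition above) =====
theorem data2mesh_spec : Claim_equal_data2mesh := by
  intro dx dy dz min_h max_h min_v max_v res _hDom hPre
  obtain ⟨hres, hcase⟩ := hPre
  unfold Spec_data2mesh
  simp only [data2mesh, data2mesh_alt, dmEmit]
  simp only [PySem.List.foldl_append_singleton_eq_map, PySem.List.foldl_append_eq_flatMap]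
  rw [foldl_emit3]
  simp only [← List.foldl_flatMap]
  rw [← List.foldl_append, foldl_emit3]
  simp only [List.nil_append, List.flatMap_append, List.flatMap_assoc, List.flatMap_map,
    List.flatMap_cons, List.flatMap_nil, List.append_nil, List.cons_append]
  have hcoef : PySem.Int.floordiv (max_v - min_v + res) res
      = PySem.Int.floordiv (max_v - min_v) res + 1 := by
    simp only [PySem.Int.floordiv]
    have h := Int.add_mul_fdiv_right (max_v - min_v) 1 hres
    simpa using h
  refine Prod.ext ?_ (Prod.ext ?_ ?_)
  · refine comp_eq dx _ _ _ hcoef ?_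
    rcases hcase with h | h | h
    exacts [Or.inl h, Or.inr (Or.inl h), Or.inr (Or.inr h.1)]
  · refine comp_eq dy _ _ _ hcoef ?_
    rcases hcase with h | h | h
    exacts [Or.inl h, Or.inr (Or.inl h), Or.inr (Or.inr h.2.1)]
  · refine comp_eq dz _ _ _ hcoef ?_
    rcases hcase with h | h | h
    exacts [Or.inl h, Or.inr (Or.inl h), Or.inr (Or.inr h.2.2)]
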